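-- pv_equiv track=rewrite | github.com/mobeen786822/job-application-assistant | tools/resume_bot.py | _parse_cover_letter_paragraphs
-- ===== SOURCE A (Python) =====
-- def _parse_cover_letter_paragraphs(cover_text: str) -> list[tuple[str, str]]:
--     raw_lines = [line.rstrip() for line in cover_text.strip().splitlines()]
--     lines = [line for line in raw_lines if line.strip() or line == '']
--
--     paragraphs: list[str] = []
--     buf: list[str] = []
--     for line in lines:
--         if not line.strip():
--             if buf:
--                 paragraphs.append(' '.join(buf).strip())
--                 buf = []
--             continue
--         buf.append(line.strip())
--     if buf:
--         paragraphs.append(' '.join(buf).strip())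
--
--     styled: list[tuple[str, str]] = []
--     for i, para in enumerate(paragraphs):
--         lower = para.lower()
--         if lower.startswith('kind regards'):
--             styled.append(('signature', 'Kind regards,'))
--             if i + 1 < len(paragraphs):
--                 styled.append(('signature', paragraphs[i + 1]))
--             break
--         styled.append(('body', para))
--     return styled
-- ===== SOURCE B (Python) =====
-- def _parse_cover_letter_paragraphs(cover_text: str) -> list[tuple[str, str]]:
--     raw_lines = [line.rstrip() for line in cover_text.strip().splitlines()]
--     lines = [line for line in raw_lines if line.strip() or line == '']
--
--     paragraphs: list[str] = []
--     i, n = 0, len(lines)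
--     while i < n:
--         if not lines[i].strip():
--             i += 1
--             continue
--         j = i
--         while j < n and lines[j].strip():
--             j += 1
--         paragraphs.append(' '.join(w.strip() for w in lines[i:j]))
--         i = j
--
--     idx = next((k for k, p in enumerate(paragraphs)
--                 if p.lower().startswith('kind regards')), None)
--     if idx is None:
--         return [('body', p) for p in paragraphs]
--     styled = [('body', p) for p in paragraphs[:idx]]
--     styled.append(('signature', 'Kind regards,'))
--     if idx + 1 < len(paragraphs):
--         styled.append(('signature', paragraphs[idx + 1]))
--     return styled
-- ===== Notes on version B (the rewrite author's own statement) =====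
-- stated objective: alternative
-- what changed: Paragraphs are rebuilt by scanning index runs of non-blank lines (two-index run scan) instead of A's accumulator-buffer-and-flush loop, and styling locates the signature paragraph once with a find-index and builds the output by slicing instead of A's enumerate-loop-with-break.
import Mathlib
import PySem

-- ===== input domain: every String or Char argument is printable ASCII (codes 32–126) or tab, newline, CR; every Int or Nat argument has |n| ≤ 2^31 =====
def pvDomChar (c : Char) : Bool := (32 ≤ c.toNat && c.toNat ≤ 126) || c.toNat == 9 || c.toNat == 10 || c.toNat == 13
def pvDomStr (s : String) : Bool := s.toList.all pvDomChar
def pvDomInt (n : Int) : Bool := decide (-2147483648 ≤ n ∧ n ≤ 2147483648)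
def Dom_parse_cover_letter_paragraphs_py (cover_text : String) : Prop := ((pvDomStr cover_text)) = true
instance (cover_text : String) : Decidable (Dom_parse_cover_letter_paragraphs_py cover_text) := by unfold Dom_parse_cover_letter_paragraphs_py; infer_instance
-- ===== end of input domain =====

-- B rebuilds the paragraphs by scanning index runs of non-blank lines and styles them by
-- locating the signature paragraph once with findIdx? and slicing, instead of A's
-- accumulator-buffer loop and loop-with-break; same return value (alternative decomposition).

-- ===== PORT A =====
def pvAParLoop : List String → List String × List String → List String × List String
  | [], st => st
  | l :: ls, (paras, buf) =>
    if PySem.Str.strip l == "" then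
      if buf.isEmpty then pvAParLoop ls (paras, buf)
      else pvAParLoop ls (paras ++ [PySem.Str.strip (PySem.Str.join " " buf)], [])
    else pvAParLoop ls (paras, buf ++ [PySem.Str.strip l])

def pvAStyle (all : List String) : Nat → List String → List (String × String)
  | _, [] => []
  | i, p :: ps =>
    if PySem.Str.startswith (PySem.Str.lower p) "kind regards" then
      ("signature", "Kind regards,") ::
        (if i + 1 < all.length then [("signature", all.getD (i + 1) "")] else [])
    else ("body", p) :: pvAStyle all (i + 1) ps

def parse_cover_letter_paragraphs_py (cover_text : String) : List (String × String) :=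
  let raw_lines := (PySem.Str.splitlines (PySem.Str.strip cover_text)).map PySem.Str.rstrip
  let lines := raw_lines.filter (fun l => !(PySem.Str.strip l == "") || l == "")
  let st := pvAParLoop lines ([], [])
  let paragraphs := if st.2.isEmpty then st.1 else st.1 ++ [PySem.Str.strip (PySem.Str.join " " st.2)]
  pvAStyle paragraphs 0 paragraphs

-- ===== PORT B =====
-- inner `while j < n and lines[j].strip(): j += 1`
def pvBAdvance (ls : List String) (j : Nat) : Nat :=
  if h : j < ls.length then
    if PySem.Str.strip ls[j] == "" then j else pvBAdvance ls (j + 1)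
  else j
termination_by ls.length - j

theorem pvBAdvance_gt (ls : List String) (i : Nat) (h : i < ls.length)
    (hnb : (PySem.Str.strip ls[i] == "") = false) : i < pvBAdvance ls i := by
  rw [pvBAdvance]
  simp only [h, hnb, dif_pos, if_neg, Bool.false_eq_true, not_false_iff]
  have : ∀ k, k ≤ pvBAdvance ls k := by
    intro k
    induction k using pvBAdvance.induct ls with
    | case1 j hj hb => rw [pvBAdvance]; simp [hj, hb]
    | case2 j hj hb ih => rw [pvBAdvance]; simp [hj, hb]; omega
    | case3 j hj => rw [pvBAdvance]; simp [hj]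
  have := this (i + 1)
  omega

-- outer `while i < n` loop building paragraphs from index runs
def pvBGo (ls : List String) (i : Nat) : List String :=
  if h : i < ls.length then
    if hb : PySem.Str.strip ls[i] == "" then pvBGo ls (i + 1)
    else
      PySem.Str.join " " ((PySem.List.slice ls (some (i : Int)) (some ((pvBAdvance ls i : Nat) : Int))).map PySem.Str.strip)
        :: pvBGo ls (pvBAdvance ls i)
  else []
termination_by ls.length - i
decreasing_by
  · omega
  · have := pvBAdvance_gt ls i h (by simpa using hb)
    omega

def parse_cover_letter_paragraphs_py_alt (cover_text : String) : List (String × String) :=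
  let raw_lines := (PySem.Str.splitlines (PySem.Str.strip cover_text)).map PySem.Str.rstrip
  let lines := raw_lines.filter (fun l => !(PySem.Str.strip l == "") || l == "")
  let paragraphs := pvBGo lines 0
  match paragraphs.findIdx? (fun p => PySem.Str.startswith (PySem.Str.lower p) "kind regards") with
  | none => paragraphs.map (fun p => ("body", p))
  | some k =>
      (paragraphs.take k).map (fun p => ("body", p)) ++
      [("signature", "Kind regards,")] ++
      (if k + 1 < paragraphs.length then [("signature", paragraphs.getD (k + 1) "")] else [])

-- ===== PRECONDITION & SPEC =====
def Spec_parse_cover_letter_paragraphs_py (cover_text : String) (out : List (String × String)) : Prop := out = parse_cover_letter_paragraphs_py_alt cover_text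
instance (cover_text : String) (out : List (String × String)) : Decidable (Spec_parse_cover_letter_paragraphs_py cover_text out) := by unfold Spec_parse_cover_letter_paragraphs_py; infer_instance

-- ===== CLAIM (what is proved, stated in full; the proofs are below) =====
def Claim_equal_parse_cover_letter_paragraphs_py : Prop := ∀ (cover_text : String), Dom_parse_cover_letter_paragraphs_py cover_text → Spec_parse_cover_letter_paragraphs_py cover_text (parse_cover_letter_paragraphs_py cover_text)

-- ===== LEMMAS AND PROOFS =====

-- proof-side description of both paragraph builders: split on blank lines via takeWhile/dropWhile
def twParas : List String → List String
  | [] => []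
  | l :: ls =>
    if PySem.Str.strip l == "" then twParas ls
    else PySem.Str.join " " ((l :: ls.takeWhile (fun x => !(PySem.Str.strip x == ""))).map PySem.Str.strip)
         :: twParas (ls.dropWhile (fun x => !(PySem.Str.strip x == "")))
termination_by l => l.length
decreasing_by
  · simp
  · have := List.length_dropWhile_le (fun x => !(PySem.Str.strip x == "")) ls
    simp; omega


-- basic dropWhile facts
theorem pv_dw_self_head {α : Type} (p : α → Bool) {l : List α} (h : List.dropWhile p l = l) :
    l = [] ∨ ∃ c cs, l = c :: cs ∧ p c = false := by
  cases l with
  | nil => exact Or.inl rfl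
  | cons c cs =>
    refine Or.inr ⟨c, cs, rfl, ?_⟩
    have := List.dropWhile_eq_self_iff.mp h (by simp)
    simpa using this

theorem pv_dw_idem {α : Type} (p : α → Bool) (l : List α) :
    List.dropWhile p (List.dropWhile p l) = List.dropWhile p l := by
  cases h : List.dropWhile p l with
  | nil => simp
  | cons c cs =>
    have hc : p c = false := by
      have := List.head_dropWhile_not p (l := l) (by simp [h])
      simpa [h] using this
    exact List.dropWhile_cons_of_neg (by simp [hc])

theorem pv_dw_drop {α : Type} (p : α → Bool) (l : List α) :
    List.dropWhile p l = l.drop (l.takeWhile p).length := by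
  induction l with
  | nil => simp
  | cons a l ih =>
    by_cases h : p a
    · simp [List.takeWhile_cons, List.dropWhile_cons, h, ih]
    · simp [List.takeWhile_cons, List.dropWhile_cons, h]

theorem pv_tw_take {α : Type} (p : α → Bool) (l : List α) :
    List.takeWhile p l = l.take (l.takeWhile p).length :=
  List.prefix_iff_eq_take.mp (List.takeWhile_prefix p)

-- Chars-level strip facts
theorem pv_rstrip_rev (cs : List Char) :
    (PySem.Chars.rstrip cs).reverse = List.dropWhile PySem.Chars.isspace cs.reverse := by
  simp [PySem.Chars.rstrip]

theorem pv_rstrip_idem (cs : List Char) :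
    PySem.Chars.rstrip (PySem.Chars.rstrip cs) = PySem.Chars.rstrip cs := by
  simp [PySem.Chars.rstrip, pv_dw_idem]

theorem pv_rstrip_prefix (cs : List Char) : PySem.Chars.rstrip cs <+: cs := by
  have h : List.dropWhile PySem.Chars.isspace cs.reverse <:+ cs.reverse := List.dropWhile_suffix _
  have := List.reverse_prefix.mpr h
  simpa [PySem.Chars.rstrip] using this

theorem pv_lstrip_rstrip {cs : List Char} (h : PySem.Chars.lstrip cs = cs) :
    PySem.Chars.lstrip (PySem.Chars.rstrip cs) = PySem.Chars.rstrip cs := by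
  cases hr : PySem.Chars.rstrip cs with
  | nil => simp [PySem.Chars.lstrip]
  | cons c cs' =>
    have hpre : (c :: cs') <+: cs := hr ▸ pv_rstrip_prefix cs
    obtain ⟨t, ht⟩ := hpre
    have hcs : cs = c :: (cs' ++ t) := by rw [← ht]; simp
    have hc : PySem.Chars.isspace c = false := by
      rcases pv_dw_self_head PySem.Chars.isspace (l := cs) h with h0 | ⟨d, ds, hd, hds⟩
      · rw [h0] at hcs; simp at hcs
      · rw [hcs] at hd
        obtain ⟨h1, _⟩ := List.cons_eq_cons.mp hd
        rwa [h1]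
    simp only [PySem.Chars.lstrip]
    exact List.dropWhile_cons_of_neg (by simp [hc])

-- the strip of anything is fixed by lstrip and rstrip
theorem pv_strip_elem (w : List Char) :
    PySem.Chars.lstrip (PySem.Chars.strip w) = PySem.Chars.strip w ∧
    PySem.Chars.rstrip (PySem.Chars.strip w) = PySem.Chars.strip w := by
  constructor
  · have hl : PySem.Chars.lstrip (PySem.Chars.lstrip w) = PySem.Chars.lstrip w := by
      simp [PySem.Chars.lstrip, pv_dw_idem]
    simpa [PySem.Chars.strip] using pv_lstrip_rstrip hl
  · simp [PySem.Chars.strip, pv_rstrip_idem]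

theorem pv_head_ns {b : List Char} (hl : PySem.Chars.lstrip b = b) (hb : b ≠ []) :
    ∃ c cs, b = c :: cs ∧ PySem.Chars.isspace c = false := by
  rcases pv_dw_self_head PySem.Chars.isspace (l := b) hl with h | h
  · exact absurd h hb
  · exact h

theorem pv_rev_head_ns {b : List Char} (hr : PySem.Chars.rstrip b = b) (hb : b ≠ []) :
    ∃ c cs, b.reverse = c :: cs ∧ PySem.Chars.isspace c = false := by
  have h : List.dropWhile PySem.Chars.isspace b.reverse = b.reverse := by
    rw [← pv_rstrip_rev, hr]
  rcases pv_dw_self_head PySem.Chars.isspace h with h0 | h0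
  · exact absurd (by simpa using congrArg List.reverse h0) hb
  · exact h0

-- join decompositions
theorem pv_join_head (sep b : List Char) (bs : List (List Char)) :
    ∃ t, PySem.Chars.join sep (b :: bs) = b ++ t := by
  cases bs with
  | nil => exact ⟨[], by simp [PySem.Chars.join_singleton]⟩
  | cons y ys => exact ⟨sep ++ PySem.Chars.join sep (y :: ys), by
      rw [PySem.Chars.join_cons_cons]; simp⟩

theorem pv_join_last (sep : List Char) :
    ∀ (bs : List (List Char)) (b : List Char), ∃ t, PySem.Chars.join sep (bs ++ [b]) = t ++ b := by
  intro bs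
  induction bs with
  | nil => intro b; exact ⟨[], by simp [PySem.Chars.join_singleton]⟩
  | cons x bs' ih =>
    intro b
    obtain ⟨t', ht'⟩ := ih b
    cases h : bs' ++ [b] with
    | nil => simp at h
    | cons y ys =>
      refine ⟨x ++ sep ++ t', ?_⟩
      rw [List.cons_append, h, PySem.Chars.join_cons_cons, ← h, ht']
      simp

-- the join of stripped nonempty pieces is already stripped
theorem pv_cjs (bs : List (List Char)) (hne : bs ≠ [])
    (h : ∀ b ∈ bs, PySem.Chars.lstrip b = b ∧ PySem.Chars.rstrip b = b ∧ b ≠ []) :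
    PySem.Chars.strip (PySem.Chars.join [' '] bs) = PySem.Chars.join [' '] bs := by
  cases bs with
  | nil => exact absurd rfl hne
  | cons b1 rest =>
    obtain ⟨hl1, _, hne1⟩ := h b1 (by simp)
    obtain ⟨c, cs, hb1, hc⟩ := pv_head_ns hl1 hne1
    obtain ⟨t, ht⟩ := pv_join_head [' '] b1 rest
    have hlstrip : PySem.Chars.lstrip (PySem.Chars.join [' '] (b1 :: rest)) =
        PySem.Chars.join [' '] (b1 :: rest) := by
      rw [ht, hb1]
      simp only [PySem.Chars.lstrip, List.cons_append]
      exact List.dropWhile_cons_of_neg (by simp [hc])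
    rcases List.eq_nil_or_concat (l := b1 :: rest) with h0 | ⟨init, bn, hsplit0⟩
    · simp at h0
    · have hsplit : b1 :: rest = init ++ [bn] := by simpa [List.concat_eq_append] using hsplit0
      obtain ⟨_, hrn, hnen⟩ := h bn (by rw [hsplit]; simp)
      obtain ⟨d, ds, hbn, hd⟩ := pv_rev_head_ns hrn hnen
      obtain ⟨t2, ht2⟩ := pv_join_last [' '] init bn
      have hrstrip : PySem.Chars.rstrip (PySem.Chars.join [' '] (b1 :: rest)) =
          PySem.Chars.join [' '] (b1 :: rest) := by
        have hrev : (PySem.Chars.join [' '] (b1 :: rest)).reverse = d :: (ds ++ t2.reverse) := by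
          rw [hsplit, ht2]
          simp [hbn]
        have : (PySem.Chars.rstrip (PySem.Chars.join [' '] (b1 :: rest))).reverse =
            (PySem.Chars.join [' '] (b1 :: rest)).reverse := by
          rw [pv_rstrip_rev, hrev, List.dropWhile_cons_of_neg (by simp [hd])]
        simpa using congrArg List.reverse this
      rw [PySem.Chars.strip, hlstrip, hrstrip]

-- Str-level: strip is the identity on a space-join of stripped non-blank strings
theorem pv_js (rs : List String) (hne : rs ≠ [])
    (h : ∀ x ∈ rs, (PySem.Str.strip x == "") = false) :
    PySem.Str.strip (PySem.Str.join " " (rs.map PySem.Str.strip)) =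
    PySem.Str.join " " (rs.map PySem.Str.strip) := by
  apply String.toList_inj.mp
  rw [PySem.Str.toList_strip, PySem.Str.toList_join]
  have hsep : (" " : String).toList = [' '] := by decide
  rw [hsep]
  apply pv_cjs
  · simp [hne]
  · intro b hb
    simp only [List.map_map, List.mem_map, Function.comp] at hb
    obtain ⟨x, hx, rfl⟩ := hb
    rw [PySem.Str.toList_strip]
    refine ⟨(pv_strip_elem x.toList).1, (pv_strip_elem x.toList).2, ?_⟩
    intro h0
    have hx0 : PySem.Str.strip x = "" := by
      apply String.toList_inj.mp
      rw [PySem.Str.toList_strip]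
      simpa using h0
    have hcontra := h x hx
    rw [hx0] at hcontra
    simp at hcontra

-- A's buffer loop absorbs a run of non-blank lines
theorem pv_run : ∀ (r : List String) (rest paras buf : List String),
    (∀ x ∈ r, (PySem.Str.strip x == "") = false) →
    pvAParLoop (r ++ rest) (paras, buf) = pvAParLoop rest (paras, buf ++ r.map PySem.Str.strip) := by
  intro r
  induction r with
  | nil => intro rest paras buf _; simp
  | cons x r' ih =>
    intro rest paras buf h
    have hx := h x (by simp)
    rw [List.cons_append, pvAParLoop]
    simp only [hx, Bool.false_eq_true, if_false]
    rw [ih rest paras (buf ++ [PySem.Str.strip x]) (fun y hy => h y (by simp [hy]))]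
    simp

-- A's paragraph builder equals the takeWhile/dropWhile description
theorem pv_main : ∀ (n : Nat) (ls paras : List String), ls.length ≤ n →
    (if (pvAParLoop ls (paras, [])).2.isEmpty then (pvAParLoop ls (paras, [])).1
     else (pvAParLoop ls (paras, [])).1 ++
       [PySem.Str.strip (PySem.Str.join " " (pvAParLoop ls (paras, [])).2)])
    = paras ++ twParas ls := by
  intro n
  induction n with
  | zero =>
    intro ls paras h
    have hnil : ls = [] := List.eq_nil_of_length_eq_zero (by omega)
    subst hnil
    simp [pvAParLoop, twParas]
  | succ n ih =>
    intro ls paras h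
    cases ls with
    | nil => simp [pvAParLoop, twParas]
    | cons l ls' =>
      cases hb : (PySem.Str.strip l == "") with
      | true =>
        rw [pvAParLoop]
        simp only [hb, if_true, List.isEmpty_nil]
        rw [twParas]
        simp only [hb, if_true]
        exact ih ls' paras (by simpa using Nat.le_of_succ_le_succ h)
      | false =>
        have hrun : ∀ x ∈ ls'.takeWhile (fun x => !(PySem.Str.strip x == "")),
            (PySem.Str.strip x == "") = false := by
          intro x hx
          have := List.mem_takeWhile_imp hx
          simpa using this
        have hjs := pv_js (l :: ls'.takeWhile (fun x => !(PySem.Str.strip x == "")))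
          (by simp)
          (by intro x hx
              rcases List.mem_cons.mp hx with rfl | hx'
              · exact hb
              · exact hrun x hx')
        have hsplit := List.takeWhile_append_dropWhile
          (p := fun x => !(PySem.Str.strip x == "")) (l := ls')
        rw [pvAParLoop]
        simp only [hb, Bool.false_eq_true, if_false, List.nil_append]
        conv_lhs => rw [← hsplit]
        rw [pv_run _ _ _ _ hrun]
        cases hrest : ls'.dropWhile (fun x => !(PySem.Str.strip x == "")) with
        | nil =>
          rw [pvAParLoop]
          simp only [List.singleton_append, List.isEmpty_cons, Bool.false_eq_true, if_false]
          rw [twParas]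
          simp only [hb, Bool.false_eq_true, if_false, hrest, twParas]
          simp [← List.map_cons, hjs]
        | cons b rs =>
          have hbb : (PySem.Str.strip b == "") = true := by
            have hfix : List.dropWhile (fun x => !(PySem.Str.strip x == "")) (b :: rs) = b :: rs := by
              conv_lhs => rw [← hrest]
              rw [pv_dw_idem, hrest]
            rcases pv_dw_self_head _ hfix with h0 | ⟨c, cs, hcc, hcf⟩
            · simp at h0
            · obtain ⟨h1, _⟩ := List.cons_eq_cons.mp hcc
              rw [← h1] at hcf
              simpa using hcf
          have hlen : rs.length ≤ n := by
            have h1 := List.length_dropWhile_le (fun x => !(PySem.Str.strip x == "")) ls'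
            rw [hrest] at h1
            simp only [List.length_cons] at h1 h
            omega
          rw [pvAParLoop]
          simp only [hbb, if_true, List.singleton_append, List.isEmpty_cons, Bool.false_eq_true,
            if_false]
          rw [ih rs _ hlen]
          rw [twParas]
          simp only [hb, Bool.false_eq_true, if_false, hrest, twParas, hbb, if_true]
          simp [← List.map_cons, hjs]

-- pvBAdvance finds the end of the non-blank run
theorem pv_adv : ∀ (n : Nat) (ls : List String) (i : Nat), ls.length - i ≤ n →
    pvBAdvance ls i = i + ((ls.drop i).takeWhile (fun x => !(PySem.Str.strip x == ""))).length := by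
  intro n
  induction n with
  | zero =>
    intro ls i h
    have hge : ls.length ≤ i := by omega
    rw [pvBAdvance]
    simp [Nat.not_lt.mpr hge, List.drop_of_length_le hge]
  | succ n ih =>
    intro ls i h
    by_cases hlt : i < ls.length
    · have hdrop : ls.drop i = ls[i] :: ls.drop (i + 1) := List.drop_eq_getElem_cons hlt
      rw [pvBAdvance]
      cases hb : (PySem.Str.strip ls[i] == "") with
      | true =>
        simp only [hlt, dif_pos, hb, if_true]
        rw [hdrop, List.takeWhile_cons_of_neg (by simp [hb])]
        simp
      | false =>
        simp only [hlt, dif_pos, hb, Bool.false_eq_true, if_false]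
        rw [ih ls (i + 1) (by omega), hdrop, List.takeWhile_cons_of_pos (by simp [hb])]
        simp only [List.length_cons]
        omega
    · rw [pvBAdvance]
      simp [hlt, List.drop_of_length_le (by omega : ls.length ≤ i)]

-- B's index loop equals the takeWhile/dropWhile description
theorem pv_bgo : ∀ (n : Nat) (ls : List String) (i : Nat), ls.length - i ≤ n →
    pvBGo ls i = twParas (ls.drop i) := by
  intro n
  induction n with
  | zero =>
    intro ls i h
    have hge : ls.length ≤ i := by omega
    rw [pvBGo]
    simp [Nat.not_lt.mpr hge, List.drop_of_length_le hge, twParas]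
  | succ n ih =>
    intro ls i h
    by_cases hlt : i < ls.length
    · have hdrop : ls.drop i = ls[i] :: ls.drop (i + 1) := List.drop_eq_getElem_cons hlt
      rw [pvBGo]
      cases hb : (PySem.Str.strip ls[i] == "") with
      | true =>
        simp only [hlt, dif_pos, hb, dif_pos]
        rw [ih ls (i + 1) (by omega), hdrop, twParas]
        simp [hb]
      | false =>
        simp only [hlt, dif_pos, hb, Bool.false_eq_true, dif_neg, not_false_iff]
        have hadv := pv_adv ls.length ls i (by omega)
        have htlen : ((ls.drop i).takeWhile (fun x => !(PySem.Str.strip x == ""))).length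
            = 1 + ((ls.drop (i + 1)).takeWhile (fun x => !(PySem.Str.strip x == ""))).length := by
          rw [hdrop, List.takeWhile_cons_of_pos (by simp [hb])]
          simp; omega
        have hslice : PySem.List.slice ls (some (i : Int)) (some ((pvBAdvance ls i : Nat) : Int))
            = (ls.drop i).takeWhile (fun x => !(PySem.Str.strip x == "")) := by
          rw [PySem.List.slice_natCast, hadv]
          have : i + ((ls.drop i).takeWhile (fun x => !(PySem.Str.strip x == ""))).length - i
              = ((ls.drop i).takeWhile (fun x => !(PySem.Str.strip x == ""))).length := by omega
          rw [this, ← pv_tw_take]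
        have hadv_ge : i + 1 ≤ pvBAdvance ls i := by rw [hadv]; omega
        have htw : (ls.drop i).takeWhile (fun x => !(PySem.Str.strip x == ""))
            = ls[i] :: (ls.drop (i + 1)).takeWhile (fun x => !(PySem.Str.strip x == "")) := by
          rw [hdrop, List.takeWhile_cons_of_pos (by simp [hb])]
        have hdrop2 : ls.drop (pvBAdvance ls i)
            = (ls.drop (i + 1)).dropWhile (fun x => !(PySem.Str.strip x == "")) := by
          rw [pv_dw_drop, List.drop_drop, hadv, htlen]
          have : i + (1 + ((ls.drop (i + 1)).takeWhile (fun x => !(PySem.Str.strip x == ""))).length)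
              = i + 1 + ((ls.drop (i + 1)).takeWhile (fun x => !(PySem.Str.strip x == ""))).length := by
            omega
          rw [this]
        rw [hslice, htw, ih ls (pvBAdvance ls i) (by omega), hdrop2, hdrop, twParas]
        simp [hb]
    · rw [pvBGo]
      simp [hlt, List.drop_of_length_le (by omega : ls.length ≤ i), twParas]

-- A's styling loop equals B's find-then-slice styling
theorem pv_style : ∀ (suf pre all : List String), all = pre ++ suf →
    pvAStyle all pre.length suf =
      (match suf.findIdx? (fun p => PySem.Str.startswith (PySem.Str.lower p) "kind regards") with
       | none => suf.map (fun p => (("body" : String), p))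
       | some j => (suf.take j).map (fun p => (("body" : String), p)) ++
           [("signature", "Kind regards,")] ++
           (if pre.length + j + 1 < all.length then
             [(("signature" : String), all.getD (pre.length + j + 1) "")] else [])) := by
  intro suf
  induction suf with
  | nil => intro pre all _; simp [pvAStyle]
  | cons p ps ih =>
    intro pre all hall
    by_cases hk : PySem.Str.startswith (PySem.Str.lower p) "kind regards"
    · rw [pvAStyle]
      simp only [hk, if_true, List.findIdx?_cons, List.take_zero, List.map_nil, List.nil_append]
      rfl
    · rw [pvAStyle]
      simp only [hk, Bool.false_eq_true, if_false]
      have hlen : (pre ++ [p]).length = pre.length + 1 := by simp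
      have h2 := ih (pre ++ [p]) all (by rw [hall]; simp)
      rw [hlen] at h2
      rw [h2]
      rw [List.findIdx?_cons]
      simp only [hk, Bool.false_eq_true, if_false]
      cases hfi : List.findIdx? (fun p => PySem.Str.startswith (PySem.Str.lower p) "kind regards") ps with
      | none => simp
      | some j =>
        simp only [Option.map_some]
        have hguard : pre.length + 1 + j + 1 = pre.length + (j + 1) + 1 := by omega
        simp [hguard, List.take_succ_cons]


-- both ports assembled over the same prepared line list
theorem pv_assemble (lines : List String) :
    pvAStyle
      (if (pvAParLoop lines ([], [])).2.isEmpty then (pvAParLoop lines ([], [])).1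
       else (pvAParLoop lines ([], [])).1 ++
         [PySem.Str.strip (PySem.Str.join " " (pvAParLoop lines ([], [])).2)]) 0
      (if (pvAParLoop lines ([], [])).2.isEmpty then (pvAParLoop lines ([], [])).1
       else (pvAParLoop lines ([], [])).1 ++
         [PySem.Str.strip (PySem.Str.join " " (pvAParLoop lines ([], [])).2)]) =
    (match (pvBGo lines 0).findIdx?
        (fun p => PySem.Str.startswith (PySem.Str.lower p) "kind regards") with
     | none => (pvBGo lines 0).map (fun p => (("body" : String), p))
     | some k =>
         ((pvBGo lines 0).take k).map (fun p => (("body" : String), p)) ++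
         [("signature", "Kind regards,")] ++
         (if k + 1 < (pvBGo lines 0).length then
           [(("signature" : String), (pvBGo lines 0).getD (k + 1) "")] else [])) := by
  have hA := pv_main lines.length lines [] le_rfl
  have hB := pv_bgo lines.length lines 0 (by omega)
  rw [List.drop_zero] at hB
  rw [List.nil_append] at hA
  rw [hA, hB]
  have hst := pv_style (twParas lines) [] (twParas lines) (by simp)
  simpa using hst

-- ===== VERDICT (by name: the statement is the Claim_ definition above) =====
theorem parse_cover_letter_paragraphs_py_spec : Claim_equal_parse_cover_letter_paragraphs_py := by
  intro ct _hdom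
  unfold Spec_parse_cover_letter_paragraphs_py
  simp only [parse_cover_letter_paragraphs_py, parse_cover_letter_paragraphs_py_alt]
  exact pv_assemble _
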